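-- pv_equiv track=rewrite | github.com/guinessjulie/planGA2 | graph.py | add_4way_boundary
-- ===== SOURCE A (Python) =====
-- def add_4way_boundary(grid):
--     """
--     동서남북 각 경계에 외부 공간을 추가하고 각기 다른 값을 할당
--     북쪽 경계: -2 값 할당
--     남쪽 경계: -3 값 할당
--     동쪽 경계: -4 값 할당
--     서쪽 경계: -5 값 할당
--     기존 grid의 각 셀은 새로운 grid에서 한 칸씩 내부로 이동하여 값 유지
--     :param grid: 입력 list of cell coord(row,col)
--     :return:new_grid
--     """
--     rows, cols = len(grid), len(grid[0])
--
--     # 새로운 grid의 크기를 기존보다 각각 2만큼 더 크게 설정하고,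
--     # 북쪽(-2)과 남쪽(-3) 경계를 설정합니다.
--     new_grid = [[-2] * (cols + 2) if r == 0 or r == rows + 1 else [-1] * (cols + 2) for r in range(rows + 2)]
--
--     # 동쪽(-4)과 서쪽(-5) 경계를 설정합니다.
--     for r in range(1, rows + 1):
--         new_grid[r][0] = -5  # 서쪽
--         new_grid[r][cols + 1] = -4  # 동쪽
--
--     # 남쪽 경계를 -3으로 설정합니다.
--     new_grid[rows + 1] = [-3] * (cols + 2)
--
--     # 기존 grid의 값을 새로운 grid에 복사합니다.
--     for r in range(rows):
--         for c in range(cols):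
--             new_grid[r + 1][c + 1] = grid[r][c]
--
--     return new_grid
-- ===== SOURCE B (Python) =====
-- def add_4way_boundary(grid):
--     """One-pass construction: append north row, each bordered row, then south row."""
--     cols = len(grid[0])
--     out = [[-2] * (cols + 2)]
--     for row in grid:
--         out.append([-5] + [row[c] for c in range(cols)] + [-4])
--     out.append([-3] * (cols + 2))
--     return out
-- ===== Notes on version B (the rewrite author's own statement) =====
-- stated objective: simpler
-- what changed: B builds the padded grid in a single forward pass (north row, then each bordered row built directly, then south row) instead of A's allocate-then-overwrite scheme of a sentinel-filled grid followed by three in-place mutation loops.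
import Mathlib
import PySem

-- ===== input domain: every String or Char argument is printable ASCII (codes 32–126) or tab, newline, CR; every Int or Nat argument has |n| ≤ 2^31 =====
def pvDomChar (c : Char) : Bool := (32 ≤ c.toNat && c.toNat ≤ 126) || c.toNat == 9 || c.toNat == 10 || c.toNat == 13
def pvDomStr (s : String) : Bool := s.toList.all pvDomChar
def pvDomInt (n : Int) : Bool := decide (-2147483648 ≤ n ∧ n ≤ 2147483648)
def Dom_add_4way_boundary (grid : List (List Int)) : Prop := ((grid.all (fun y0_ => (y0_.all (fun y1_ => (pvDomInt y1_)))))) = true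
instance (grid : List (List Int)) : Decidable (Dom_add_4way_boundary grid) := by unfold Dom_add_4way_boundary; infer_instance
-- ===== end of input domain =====

-- B replaces A's allocate-then-overwrite scheme by a single forward pass appending finished rows (objective: simpler).

-- ===== PORT A =====
-- literal transliteration of A: allocate a sentinel grid, then three in-place update loops (List.set = Python item assignment)
def add_4way_boundary (grid : List (List Int)) : List (List Int) :=
  let rows := grid.length
  let cols := (grid.headD []).length   -- len(grid[0]); Pre_ guarantees grid ≠ []
  let new0 := (List.range (rows + 2)).map (fun r =>
    if r = 0 ∨ r = rows + 1 then List.replicate (cols + 2) (-2 : Int) else List.replicate (cols + 2) (-1 : Int))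
  -- for r in range(1, rows+1): new_grid[r][0] = -5; new_grid[r][cols+1] = -4
  let new1 := (List.range' 1 rows).foldl
    (fun g r => g.set r (((g.getD r []).set 0 (-5)).set (cols + 1) (-4))) new0
  -- new_grid[rows+1] = [-3]*(cols+2)
  let new2 := new1.set (rows + 1) (List.replicate (cols + 2) (-3 : Int))
  -- for r in range(rows): for c in range(cols): new_grid[r+1][c+1] = grid[r][c]
  (List.range rows).foldl
    (fun g r => (List.range cols).foldl
      (fun g c => g.set (r + 1) ((g.getD (r + 1) []).set (c + 1) ((grid.getD r []).getD c 0))) g) new2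

-- ===== PORT B =====
-- literal transliteration of B: out = [north]; append a bordered row per input row (row[c] for c in range(cols)); append south
def add_4way_boundary_alt (grid : List (List Int)) : List (List Int) :=
  let cols := (grid.headD []).length
  let out := grid.foldl
    (fun out row => out ++ [(-5 : Int) :: ((List.range cols).map (fun c => row.getD c 0) ++ [-4])])
    [List.replicate (cols + 2) (-2 : Int)]
  out ++ [List.replicate (cols + 2) (-3 : Int)]

-- ===== PRECONDITION & SPEC =====
-- Pre_ excludes exactly the inputs where both Pythons raise IndexError: the empty grid (len(grid[0]))
-- and grids with a row shorter than the first row (the r/c indexing in each copy loop).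
def Pre_add_4way_boundary (grid : List (List Int)) : Prop :=
  grid ≠ [] ∧ ∀ row ∈ grid, (grid.headD []).length ≤ row.length
instance (grid : List (List Int)) : Decidable (Pre_add_4way_boundary grid) := by
  unfold Pre_add_4way_boundary; infer_instance
def pvWitness_add_4way_boundary : List (List Int) := [[1, 2], [3, 4]]

def Spec_add_4way_boundary (grid : List (List Int)) (out : List (List Int)) : Prop := out = add_4way_boundary_alt grid
instance (grid : List (List Int)) (out : List (List Int)) : Decidable (Spec_add_4way_boundary grid out) := by unfold Spec_add_4way_boundary; infer_instance

-- ===== CLAIM (what is proved, stated in full; the proofs are below) =====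
def Claim_equal_add_4way_boundary : Prop := ∀ (grid : List (List Int)), Dom_add_4way_boundary grid → Pre_add_4way_boundary grid → Spec_add_4way_boundary grid (add_4way_boundary grid)

-- ===== LEMMAS AND PROOFS =====

-- generic loop lemma: a foldl over range' k n whose step rewrites exactly the cell at the index
-- turns the middle segment of 'pre ++ mid ++ suf' into a mapIdx
theorem pv_foldl_set_shape {α : Type} (s : List α → Nat → List α) (F : Nat → α → α)
    (Hs : ∀ (k : Nat) (pre : List α) (x : α) (rest : List α), pre.length = k →
      s (pre ++ x :: rest) k = pre ++ F k x :: rest) :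
    ∀ (n k : Nat) (pre mid suf : List α), pre.length = k → mid.length = n →
      (List.range' k n).foldl s (pre ++ mid ++ suf)
        = pre ++ (mid.mapIdx fun i x => F (k + i) x) ++ suf := by
  intro n
  induction n with
  | zero => intro k pre mid suf hp hm
            simp [List.length_eq_zero_iff.mp hm]
  | succ n ih =>
      intro k pre mid suf hp hm
      cases mid with
      | nil => simp at hm
      | cons x mid' =>
        rw [List.range'_succ, List.foldl_cons]
        have h1 : pre ++ (x :: mid') ++ suf = pre ++ x :: (mid' ++ suf) := by simp
        rw [h1, Hs k pre x (mid' ++ suf) hp]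
        have h2 : pre ++ F k x :: (mid' ++ suf) = (pre ++ [F k x]) ++ mid' ++ suf := by simp
        rw [h2, ih (k + 1) (pre ++ [F k x]) mid' suf (by simp [hp]) (by simpa using hm)]
        have hface : (fun i (x : α) => F (k + 1 + i) x) = fun i x => F (k + (i + 1)) x := by
          funext i x; congr 1; omega
        simp [List.mapIdx_cons, hface]

theorem pv_last_set {α : Type} (l : List α) (x y : α) : (l ++ [x]).set l.length y = l ++ [y] := by
  induction l with
  | nil => rfl
  | cons a l ih => simp [ih]

theorem pv_replicate_set {α : Type} (n : Nat) (x y : α) :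
    (List.replicate (n + 1) x).set n y = List.replicate n x ++ [y] := by
  have := pv_last_set (List.replicate n x) x y
  simpa [List.replicate_succ' (n := n)] using this

theorem pv_getD_mid {α : Type} (pre : List α) (x : α) (rest : List α) (d : α) :
    (pre ++ x :: rest).getD pre.length d = x := by
  induction pre with
  | nil => rfl
  | cons a l ih => simpa using ih

theorem pv_set_mid {α : Type} (pre : List α) (x : α) (rest : List α) (y : α) :
    (pre ++ x :: rest).set pre.length y = pre ++ y :: rest := by
  induction pre with
  | nil => rfl
  | cons a l ih => simp [ih]

theorem pv_mapIdx_map {α β : Type} (G : α → β) (l : List α) :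
    l.mapIdx (fun _ x => G x) = l.map G := by
  apply List.ext_getElem <;> simp

theorem pv_foldl_append {α β : Type} (g : α → β) (l : List α) (acc : List β) :
    l.foldl (fun out row => out ++ [g row]) acc = acc ++ l.map g := by
  induction l generalizing acc with
  | nil => simp
  | cons a l ih => simp [ih]

theorem pv_foldl_shift {α : Type} (s : List α → Nat → List α) (n : Nat) (g : List α) :
    (List.range n).foldl (fun g r => s g (1 + r)) g = (List.range' 1 n).foldl s g := by
  conv_rhs => rw [List.range'_eq_map_range, List.foldl_map]

theorem pv_inner_collapse {α : Type} (j : Nat) (f : Nat → α → α) (d : α) :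
    ∀ (l : List Nat) (g : List α), j < g.length →
      l.foldl (fun g c => g.set j (f c (g.getD j d))) g
        = g.set j (l.foldl (fun row c => f c row) (g.getD j d)) := by
  intro l
  induction l with
  | nil =>
      intro g hj
      rw [List.foldl_nil, List.foldl_nil, List.getD_eq_getElem _ _ hj, List.set_getElem_self]
  | cons a l ih =>
      intro g hj
      rw [List.foldl_cons, List.foldl_cons, ih _ (by simpa using hj)]
      have hgd : (g.set j (f a (g.getD j d))).getD j d = f a (g.getD j d) := by
        rw [List.getD_eq_getElem _ _ (by simpa using hj), List.getElem_set_self]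
      rw [hgd, List.set_set]

theorem pv_edge (cols : Nat) :
    ((List.replicate (cols + 2) (-1 : Int)).set 0 (-5)).set (cols + 1) (-4)
      = -5 :: List.replicate cols (-1 : Int) ++ [-4] := by
  rw [List.replicate_succ, List.set_cons_zero, List.set_cons_succ, pv_replicate_set]
  simp

theorem pv_new0 (rows cols : Nat) :
    (List.range (rows + 2)).map (fun r =>
        if r = 0 ∨ r = rows + 1 then List.replicate (cols + 2) (-2 : Int)
        else List.replicate (cols + 2) (-1 : Int))
      = List.replicate (cols + 2) (-2 : Int)
          :: List.replicate rows (List.replicate (cols + 2) (-1 : Int))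
          ++ [List.replicate (cols + 2) (-2 : Int)] := by
  have h1 : List.range (rows + 2) = 0 :: (List.range' 1 rows ++ [rows + 1]) := by
    rw [List.range_eq_range', List.range'_succ, Nat.zero_add, List.range'_concat]
    simp [Nat.add_comm]
  rw [h1]
  rw [List.map_cons, List.map_append, List.map_cons, List.map_nil]
  have h2 : (List.range' 1 rows).map (fun r =>
      if r = 0 ∨ r = rows + 1 then List.replicate (cols + 2) (-2 : Int)
      else List.replicate (cols + 2) (-1 : Int))
      = List.replicate rows (List.replicate (cols + 2) (-1 : Int)) := by
    rw [List.map_congr_left (g := fun _ => List.replicate (cols + 2) (-1 : Int))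
      (by intro r hr
          rw [List.mem_range'_1] at hr
          rw [if_neg]
          omega)]
    rw [List.map_const', List.length_range']
  rw [h2, if_pos (Or.inl rfl), if_pos (Or.inr (by omega))]
  simp

theorem pv_take_eq_rangeMap (cols : Nat) (src : List Int) (h : cols ≤ src.length) :
    (List.range cols).map (fun c => src.getD c 0) = src.take cols := by
  apply List.ext_getElem
  · simp [Nat.min_eq_left h]
  · intro i hi1 hi2
    simp at hi1
    simp [List.getElem?_eq_getElem (by omega : i < src.length)]

theorem pv_rowcopy (cols : Nat) (src : List Int) (hle : cols ≤ src.length) :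
    (List.range cols).foldl (fun row c => row.set (c + 1) (src.getD c 0))
        (-5 :: List.replicate cols (-1 : Int) ++ [-4])
      = -5 :: src.take cols ++ [-4] := by
  have hstep : (fun (row : List Int) (c : Nat) => row.set (c + 1) (src.getD c 0))
      = fun row c => (fun (row : List Int) (j : Nat) => row.set j (src.getD (j - 1) 0)) row (1 + c) := by
    funext row c
    simp [Nat.add_comm 1 c]
  rw [hstep, pv_foldl_shift (fun (row : List Int) (j : Nat) => row.set j (src.getD (j - 1) 0)) cols _]
  have hinit : (-5 : Int) :: List.replicate cols (-1 : Int) ++ [-4]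
      = [(-5 : Int)] ++ List.replicate cols (-1 : Int) ++ [(-4 : Int)] := by simp
  rw [hinit, pv_foldl_set_shape (fun (row : List Int) (j : Nat) => row.set j (src.getD (j - 1) 0))
    (fun j _ => src.getD (j - 1) 0)
    (by intro k pre x rest hp
        rw [← hp]
        exact pv_set_mid pre x rest _)
    cols 1 [(-5 : Int)] (List.replicate cols (-1 : Int)) [(-4 : Int)] rfl (by simp)]
  have hmid : (List.replicate cols (-1 : Int)).mapIdx (fun i _ => src.getD (1 + i - 1) 0)
      = src.take cols := by
    apply List.ext_getElem
    · simp [Nat.min_eq_left hle]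
    · intro i hi1 hi2
      rw [List.getElem_mapIdx, List.getElem_take]
      have h : 1 + i - 1 = i := by omega
      rw [h, List.getD_eq_getElem _ _ (by simp at hi1; omega)]
  rw [hmid]
  simp

theorem pv_main (grid : List (List Int))
    (hall : ∀ row ∈ grid, (grid.headD []).length ≤ row.length) :
    add_4way_boundary grid = add_4way_boundary_alt grid := by
  unfold add_4way_boundary add_4way_boundary_alt
  dsimp only
  set rows := grid.length with hrows
  set cols := (grid.headD []).length with hcols
  set rep2 := List.replicate (cols + 2) (-2 : Int) with hrep2
  set rep3 := List.replicate (cols + 2) (-3 : Int) with hrep3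
  set edge := ((-5 : Int) :: List.replicate cols (-1 : Int) ++ [-4]) with hedge
  -- stage 0: the comprehension = north ++ interior sentinel rows ++ a -2 row
  rw [pv_new0 rows cols, ← hrep2]
  -- stage 1: the west/east loop rewrites each interior row to -5 :: … ++ [-4]
  have h1 := pv_foldl_set_shape
    (fun (g : List (List Int)) (r : Nat) => g.set r (((g.getD r []).set 0 (-5)).set (cols + 1) (-4)))
    (fun _ x => (x.set 0 (-5)).set (cols + 1) (-4))
    (by intro k pre x rest hp
        rw [← hp]
        show (pre ++ x :: rest).set pre.length
            ((((pre ++ x :: rest).getD pre.length []).set 0 (-5)).set (cols + 1) (-4)) = _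
        rw [pv_getD_mid, pv_set_mid])
    rows 1 [rep2] (List.replicate rows (List.replicate (cols + 2) (-1 : Int))) [rep2] rfl (by simp)
  have hinit1 : rep2 :: List.replicate rows (List.replicate (cols + 2) (-1 : Int)) ++ [rep2]
      = [rep2] ++ List.replicate rows (List.replicate (cols + 2) (-1 : Int)) ++ [rep2] := by simp
  rw [hinit1, h1, pv_mapIdx_map, List.map_replicate, pv_edge, ← hedge]
  -- stage 2: the south-row assignment replaces the trailing -2 row by rep3
  have h2 := pv_last_set ([rep2] ++ List.replicate rows edge) rep2 rep3
  rw [show ([rep2] ++ List.replicate rows edge).length = rows + 1 by simp] at h2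
  rw [show [rep2] ++ List.replicate rows edge ++ [rep2]
        = ([rep2] ++ List.replicate rows edge) ++ [rep2] by simp] at h2 ⊢
  rw [h2]
  -- stage 3: the copy loop, row by row
  have hstep : (fun (g : List (List Int)) (r : Nat) => (List.range cols).foldl
        (fun g c => g.set (r + 1) ((g.getD (r + 1) []).set (c + 1) ((grid.getD r []).getD c 0))) g)
      = fun g r => (fun (g : List (List Int)) (j : Nat) => (List.range cols).foldl
        (fun g c => g.set j ((g.getD j []).set (c + 1) ((grid.getD (j - 1) []).getD c 0))) g) g (1 + r) := by
    funext g r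
    simp [Nat.add_comm 1 r]
  rw [hstep, pv_foldl_shift (fun (g : List (List Int)) (j : Nat) => (List.range cols).foldl
        (fun g c => g.set j ((g.getD j []).set (c + 1) ((grid.getD (j - 1) []).getD c 0))) g) rows _]
  rw [show ([rep2] ++ List.replicate rows edge) ++ [rep3]
        = [rep2] ++ List.replicate rows edge ++ [rep3] by simp]
  rw [pv_foldl_set_shape
    (fun (g : List (List Int)) (j : Nat) => (List.range cols).foldl
        (fun g c => g.set j ((g.getD j []).set (c + 1) ((grid.getD (j - 1) []).getD c 0))) g)
    (fun j x => (List.range cols).foldl (fun row c => row.set (c + 1) ((grid.getD (j - 1) []).getD c 0)) x)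
    (by intro k pre x rest hp
        rw [← hp]
        show (List.range cols).foldl (fun g c => g.set pre.length
            ((g.getD pre.length []).set (c + 1) ((grid.getD (pre.length - 1) []).getD c 0))) (pre ++ x :: rest) = _
        rw [pv_inner_collapse pre.length
          (fun c row => row.set (c + 1) ((grid.getD (pre.length - 1) []).getD c 0)) []
          (List.range cols) (pre ++ x :: rest) (by simp)]
        rw [pv_getD_mid, pv_set_mid])
    rows 1 [rep2] (List.replicate rows edge) [rep3] rfl (by simp)]
  -- stage 4: identify the rewritten middle rows with B's mapped rows
  have hmid : (List.replicate rows edge).mapIdx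
      (fun i x => (List.range cols).foldl
        (fun row c => row.set (c + 1) ((grid.getD (1 + i - 1) []).getD c 0)) x)
      = grid.map (fun row => -5 :: ((List.range cols).map (fun c => row.getD c 0) ++ [-4])) := by
    apply List.ext_getElem
    · simp [hrows]
    · intro i hi1 hi2
      have higrid : i < grid.length := by simp at hi1; omega
      rw [List.getElem_mapIdx, List.getElem_replicate, List.getElem_map]
      rw [show 1 + i - 1 = i by omega, List.getD_eq_getElem _ _ higrid, hedge]
      have hle := hall grid[i] (List.getElem_mem higrid)
      rw [pv_rowcopy cols grid[i] hle, pv_take_eq_rangeMap cols grid[i] hle]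
      simp
  rw [hmid]
  -- B's side: the append-fold is the north row followed by the mapped rows
  rw [pv_foldl_append]

-- ===== VERDICT =====
theorem add_4way_boundary_spec : Claim_equal_add_4way_boundary := by
  intro grid _ hpre
  unfold Spec_add_4way_boundary
  exact pv_main grid hpre.2
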